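-- pv_equiv track=rewrite | github.com/jonghyunlee1993/DailyAlgorithms | Python/progrmmers/예산_이분탐색_level-3.py | solution
-- ===== SOURCE A (Python) =====
-- def solution(budgets, M):
--     answer = 0
--     min_val, max_val = 0, max(budgets)
--
--     while min_val <= max_val:
--         mid_val = (min_val + max_val) // 2
--         temp = [i if i < mid_val else mid_val for i in budgets]
--
--         if sum(temp) > M:
--             max_val = mid_val - 1
--         else:
--             answer = mid_val
--             min_val = mid_val + 1
--
--     return answer
-- ===== SOURCE B (Python) =====
-- def solution(budgets, M):
--     mx = max(budgets)
--     bs = sorted(budgets)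
--     n = len(bs)
--     s = 0
--     for i, b in enumerate(bs):
--         if s + b * (n - i) > M:
--             cap = (M - s) // (n - i)
--             return cap if cap > 0 else 0
--         s += b
--     return mx if mx > 0 else 0
-- ===== Notes on version B (the rewrite author's own statement) =====
-- stated objective: faster
-- what changed: Replaced binary search over the cap value (recomputing the whole capped sum each probe) by sort + running prefix sums with a single integer-division formula for the cap.
-- outside the precondition, e.g. on solution([], 0): A raises ValueError, B raises ValueError
import Mathlib
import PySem

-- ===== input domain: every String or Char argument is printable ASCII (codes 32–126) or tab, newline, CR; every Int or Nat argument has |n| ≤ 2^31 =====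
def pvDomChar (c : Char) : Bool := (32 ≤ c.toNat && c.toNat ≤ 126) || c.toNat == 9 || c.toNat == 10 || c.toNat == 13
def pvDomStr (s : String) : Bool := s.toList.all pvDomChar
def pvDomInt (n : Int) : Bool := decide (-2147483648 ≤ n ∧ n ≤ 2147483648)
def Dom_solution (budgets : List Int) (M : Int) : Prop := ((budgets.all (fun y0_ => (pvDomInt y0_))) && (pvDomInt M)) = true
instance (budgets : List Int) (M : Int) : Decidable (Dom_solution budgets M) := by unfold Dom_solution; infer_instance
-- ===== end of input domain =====

-- B replaces A's binary search over the cap value by sort + running prefix sums with a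
-- direct integer-division formula for the cap (objective: different algorithm; both exact).

-- ===== PORT A =====
-- the while-loop of A; state (min_val, max_val, answer); the interval [lo, hi] shrinks
def solutionLoop (budgets : List Int) (M : Int) (lo hi ans : Int) : Int :=
  if h : lo ≤ hi then
    let mid := PySem.Int.floordiv (lo + hi) 2
    let temp := budgets.map (fun i => if i < mid then i else mid)
    if temp.sum > M then
      solutionLoop budgets M lo (mid - 1) ans
    else
      solutionLoop budgets M (mid + 1) hi mid
  else ans
termination_by (hi + 1 - lo).toNat
decreasing_by
  · have := PySem.Int.floordiv_two_mid_bounds h; omega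
  · have := PySem.Int.floordiv_two_mid_bounds h; omega

def solution (budgets : List Int) (M : Int) : Int :=
  match PySem.List.max? budgets (fun x => x) with
  | none => 0        -- max([]) raises ValueError in Python: excluded by Pre_solution
  | some mx => solutionLoop budgets M 0 mx 0

-- ===== PORT B =====
-- B's for-loop over the sorted list: i is the index, s the prefix sum; some cap = early return
def altLoop (M n : Int) : List Int → Int → Int → Option Int
  | [], _, _ => none
  | b :: rest, i, s =>
    if s + b * (n - i) > M then
      some (if PySem.Int.floordiv (M - s) (n - i) > 0 then PySem.Int.floordiv (M - s) (n - i) else 0)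
    else altLoop M n rest (i + 1) (s + b)

def solution_alt (budgets : List Int) (M : Int) : Int :=
  match PySem.List.max? budgets (fun x => x) with
  | none => 0        -- max([]) raises ValueError in Python: excluded by Pre_solution
  | some mx =>
    let bs := PySem.List.sorted budgets (fun x => x)
    match altLoop M (bs.length : Int) bs 0 0 with
    | some cap => cap
    | none => if mx > 0 then mx else 0

-- ===== PRECONDITION & SPEC =====
-- Pre_ excludes only the empty list, on which Python's max() raises ValueError in A (and in B).
def Pre_solution (budgets : List Int) (M : Int) : Prop := budgets ≠ []
instance (budgets : List Int) (M : Int) : Decidable (Pre_solution budgets M) := by unfold Pre_solution; infer_instance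
def pvWitness_solution : List Int × Int := ([1, 3, 2, 5, 4], 9)

def Spec_solution (budgets : List Int) (M : Int) (out : Int) : Prop := out = solution_alt budgets M
instance (budgets : List Int) (M : Int) (out : Int) : Decidable (Spec_solution budgets M out) := by unfold Spec_solution; infer_instance

-- ===== CLAIM (what is proved, stated in full; the proofs are below) =====
def Claim_equal_solution : Prop := ∀ (budgets : List Int) (M : Int), Dom_solution budgets M → Pre_solution budgets M → Spec_solution budgets M (solution budgets M)

-- ===== LEMMAS AND PROOFS =====

-- f c = sum(i if i < c else c for i in budgets), the capped sum both programs compare with M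
def cappedSum (budgets : List Int) (c : Int) : Int :=
  (budgets.map (fun i => if i < c then i else c)).sum

theorem cappedSum_mono (budgets : List Int) {c d : Int} (h : c ≤ d) :
    cappedSum budgets c ≤ cappedSum budgets d := by
  induction budgets with
  | nil => simp [cappedSum]
  | cons b t ih =>
    simp only [cappedSum, List.map_cons, List.sum_cons] at *
    have : (if b < c then b else c) ≤ (if b < d then b else d) := by
      split_ifs <;> omega
    omega

theorem cappedSum_split (pre suf : List Int) (c : Int)
    (hpre : ∀ p ∈ pre, p ≤ c) (hsuf : ∀ q ∈ suf, c ≤ q) :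
    cappedSum (pre ++ suf) c = pre.sum + c * (suf.length : Int) := by
  simp only [cappedSum, List.map_append, List.sum_append]
  have h1 : (pre.map (fun i => if i < c then i else c)).sum = pre.sum := by
    induction pre with
    | nil => simp
    | cons p t ih =>
      have hp := hpre p (by simp)
      have ht := ih (fun x hx => hpre x (by simp [hx]))
      simp only [List.map_cons, List.sum_cons, ht]
      split_ifs <;> omega
  have h2 : (suf.map (fun i => if i < c then i else c)).sum = c * (suf.length : Int) := by
    induction suf with
    | nil => simp
    | cons q t ih =>
      have hq := hsuf q (by simp)
      have ht := ih (fun x hx => hsuf x (by simp [hx]))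
      simp only [List.map_cons, List.sum_cons, List.length_cons, ht]
      have : ¬ q < c := by omega
      simp [this]; ring
  rw [h1, h2]

theorem solutionLoop_post (budgets : List Int) (M : Int) : ∀ (n : Nat) (lo hi ans : Int),
    (hi + 1 - lo).toNat = n →
    (solutionLoop budgets M lo hi ans = ans ∧
       ∀ c, lo ≤ c → c ≤ hi → cappedSum budgets c > M) ∨
    (lo ≤ solutionLoop budgets M lo hi ans ∧ solutionLoop budgets M lo hi ans ≤ hi ∧
       cappedSum budgets (solutionLoop budgets M lo hi ans) ≤ M ∧
       ∀ c, solutionLoop budgets M lo hi ans < c → c ≤ hi → cappedSum budgets c > M) := by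
  intro n
  induction n using Nat.strong_induction_on with
  | _ n ih =>
    intro lo hi ans hn
    by_cases h : lo ≤ hi
    · have hmid := PySem.Int.floordiv_two_mid_bounds h
      set mid := PySem.Int.floordiv (lo + hi) 2 with hmiddef
      have hunf : solutionLoop budgets M lo hi ans =
          if cappedSum budgets mid > M then solutionLoop budgets M lo (mid - 1) ans
          else solutionLoop budgets M (mid + 1) hi mid := by
        rw [solutionLoop]
        simp only [dif_pos h, cappedSum, ← hmiddef]
        rfl
      by_cases hsum : cappedSum budgets mid > M
      · rw [hunf, if_pos hsum]
        rcases ih ((mid - 1) + 1 - lo).toNat (by omega) lo (mid - 1) ans rfl with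
          ⟨heq, hbad⟩ | ⟨h1, h2, h3, h4⟩
        · left
          refine ⟨heq, fun c hc1 hc2 => ?_⟩
          by_cases hcm : c ≤ mid - 1
          · exact hbad c hc1 hcm
          · have := cappedSum_mono budgets (show mid ≤ c by omega); omega
        · right
          refine ⟨h1, by omega, h3, fun c hc1 hc2 => ?_⟩
          by_cases hcm : c ≤ mid - 1
          · exact h4 c hc1 hcm
          · have := cappedSum_mono budgets (show mid ≤ c by omega); omega
      · rw [hunf, if_neg hsum]
        rcases ih (hi + 1 - (mid + 1)).toNat (by omega) (mid + 1) hi mid rfl with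
          ⟨heq, hbad⟩ | ⟨h1, h2, h3, h4⟩
        · right
          rw [heq]
          exact ⟨hmid.1, hmid.2, by omega, fun c hc1 hc2 => hbad c (by omega) hc2⟩
        · right
          exact ⟨by omega, h2, h3, h4⟩
    · rw [solutionLoop, dif_neg h]
      left
      exact ⟨rfl, fun c hc1 hc2 => absurd (le_trans hc1 hc2) h⟩

theorem altLoop_post (M : Int) (bs : List Int) (hsort : List.Pairwise (· ≤ ·) bs)
    (hne : bs ≠ []) :
    ∀ (suf pre : List Int), bs = pre ++ suf →
    (pre = [] ∨ ∃ p0, p0 ∈ pre ∧ (∀ p ∈ pre, p ≤ p0) ∧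
        pre.sum + p0 * (suf.length : Int) ≤ M) →
    (altLoop M (bs.length : Int) suf (pre.length : Int) pre.sum = none ∧ bs.sum ≤ M) ∨
    (∃ cap, altLoop M (bs.length : Int) suf (pre.length : Int) pre.sum =
        some (if cap > 0 then cap else 0) ∧
      cappedSum bs cap ≤ M ∧ (∀ c, cap < c → cappedSum bs c > M) ∧ ∃ q ∈ bs, cap < q) := by
  intro suf
  induction suf with
  | nil =>
    intro pre hbs hM
    left
    refine ⟨rfl, ?_⟩
    rcases hM with h0 | ⟨p0, hp0, _, hle⟩
    · subst hbs; simp_all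
    · subst hbs
      simp only [List.append_nil] at *
      simp only [List.length_nil, Int.natCast_zero, mul_zero] at hle
      omega
  | cons b rest ihsuf =>
    intro pre hbs hM
    have hlen0 : bs.length = pre.length + (rest.length + 1) := by rw [hbs]; simp
    have hlen : (bs.length : Int) - (pre.length : Int) = (rest.length : Int) + 1 := by
      omega
    have hpos : (0:Int) < (bs.length : Int) - (pre.length : Int) := by omega
    have hsplit := (List.pairwise_append.mp (hbs ▸ hsort))
    obtain ⟨hpre_sorted, hsuf_sorted, hcross⟩ := hsplit
    have hble : ∀ q ∈ b :: rest, b ≤ q := by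
      intro q hq
      rcases hq with _ | hq
      · exact le_refl _
      · exact (List.pairwise_cons.mp hsuf_sorted).1 q (by assumption)
    have hsuflen : (((b :: rest).length : Int)) = (bs.length : Int) - (pre.length : Int) := by
      simp only [List.length_cons]; omega
    by_cases htrig : pre.sum + b * ((bs.length : Int) - (pre.length : Int)) > M
    · -- early return with the division cap
      right
      obtain ⟨d, hd⟩ : ∃ d : Int, d = (bs.length : Int) - (pre.length : Int) := ⟨_, rfl⟩
      have hdpos : (0:Int) < d := by omega
      have hdlen : d = (rest.length : Int) + 1 := by omega
      obtain ⟨cap, hcap⟩ : ∃ c : Int, c = PySem.Int.floordiv (M - pre.sum) d := ⟨_, rfl⟩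
      have hcapd : cap * d ≤ M - pre.sum := by
        rw [hcap]
        exact (PySem.Int.le_floordiv_iff_mul_le hdpos).mp (le_refl _)
      have hcapmax : ∀ q : Int, q * d ≤ M - pre.sum → q ≤ cap := by
        intro q hq
        rw [hcap]
        exact (PySem.Int.le_floordiv_iff_mul_le hdpos).mpr hq
      have hcaplt : cap < b := by
        rw [hcap]
        exact (PySem.Int.floordiv_lt_iff_lt_mul hdpos).mpr (by rw [← hd] at htrig; omega)
      have hprele : ∀ p ∈ pre, p ≤ cap := by
        intro p hp
        rcases hM with h0 | ⟨p0, hp0, hmax, hle⟩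
        · simp [h0] at hp
        · have hle' : p0 * d ≤ M - pre.sum := by
            simp only [List.length_cons] at hle
            push_cast at hle
            rw [hdlen]
            omega
          exact le_trans (hmax p hp) (hcapmax p0 hle')
      refine ⟨cap, ?_, ?_, ?_, ⟨b, by rw [hbs]; simp, hcaplt⟩⟩
      · rw [altLoop, if_pos htrig, hcap, hd]
      · have hsp := cappedSum_split pre (b :: rest) cap hprele
          (fun q hq => le_of_lt (lt_of_lt_of_le hcaplt (hble q hq)))
        rw [← hbs] at hsp
        rw [hsp, hsuflen, ← hd]
        omega
      · intro c hc
        by_cases hcb : c ≤ b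
        · have hsp := cappedSum_split pre (b :: rest) c
            (fun p hp => le_trans (hprele p hp) (le_of_lt hc))
            (fun q hq => le_trans hcb (hble q hq))
          rw [← hbs] at hsp
          rw [hsp, hsuflen, ← hd]
          have hgt : (cap + 1) * d > M - pre.sum := by
            by_contra hle
            have := hcapmax (cap + 1) (by omega)
            omega
          have hmul : (cap + 1) * d ≤ c * d :=
            mul_le_mul_of_nonneg_right (by omega) (le_of_lt hdpos)
          omega
        · have hb : cappedSum bs b > M := by
            have hsp := cappedSum_split pre (b :: rest) b
              (fun p hp => le_trans (hprele p hp) (le_of_lt hcaplt)) hble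
            rw [← hbs] at hsp
            rw [hsp, hsuflen, ← hd]
            rw [← hd] at htrig
            omega
          have := cappedSum_mono bs (show b ≤ c by omega)
          omega
    · -- continue the loop
      have hstep : altLoop M (bs.length : Int) (b :: rest) (pre.length : Int) pre.sum =
          altLoop M (bs.length : Int) rest ((pre.length : Int) + 1) (pre.sum + b) := by
        rw [altLoop, if_neg htrig]
      have hpre' : bs = (pre ++ [b]) ++ rest := by simp [hbs]
      have hM' : (pre ++ [b]) = [] ∨ ∃ p0, p0 ∈ pre ++ [b] ∧ (∀ p ∈ pre ++ [b], p ≤ p0) ∧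
          (pre ++ [b]).sum + p0 * ((rest.length : Int)) ≤ M := by
        right
        refine ⟨b, by simp, ?_, ?_⟩
        · intro p hp
          rcases List.mem_append.mp hp with hp | hp
          · exact hcross p hp b (by simp)
          · simp at hp; omega
        · simp only [List.sum_append, List.sum_cons, List.sum_nil]
          rw [hlen] at htrig
          have hmul : b * ((rest.length : Int) + 1) = b * (rest.length : Int) + b := by ring
          omega
      have hres := ihsuf (pre ++ [b]) hpre' hM'
      rw [hstep]
      have harg1 : ((pre ++ [b]).length : Int) = (pre.length : Int) + 1 := by simp
      have harg2 : (pre ++ [b]).sum = pre.sum + b := by simp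
      rw [harg1, harg2] at hres
      exact hres


theorem cappedSum_perm {xs ys : List Int} (h : xs.Perm ys) (c : Int) :
    cappedSum xs c = cappedSum ys c :=
  List.Perm.sum_eq (h.map _)

theorem solution_agrees (budgets : List Int) (M : Int) (h : budgets ≠ []) :
    solution budgets M = solution_alt budgets M := by
  obtain ⟨mx, hmx⟩ : ∃ mx, PySem.List.max? budgets (fun x => x) = some mx := by
    cases hm : PySem.List.max? budgets (fun x => x) with
    | none => exact absurd ((PySem.List.max?_eq_none_iff budgets (fun x => x)).mp hm) h
    | some mx => exact ⟨mx, rfl⟩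
  have hmx_mem : mx ∈ budgets := PySem.List.max?_mem hmx
  have hmx_max : ∀ y ∈ budgets, y ≤ mx := PySem.List.max?_isMax hmx
  -- the sorted copy used by B
  obtain ⟨bs, hbsdef⟩ : ∃ bs, bs = PySem.List.sorted budgets (fun x => x) := ⟨_, rfl⟩
  have hperm : bs.Perm budgets := hbsdef ▸ PySem.List.sorted_perm budgets (fun x => x) false
  have hsort : List.Pairwise (· ≤ ·) bs := by
    have := PySem.List.sorted_pairwise budgets (fun x => x)
    rw [← hbsdef] at this
    exact this
  have hbs_ne : bs ≠ [] := by
    intro hnil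
    have hlen := hperm.length_eq
    rw [hnil] at hlen
    simp only [List.length_nil] at hlen
    exact h (List.length_eq_zero_iff.mp hlen.symm)
  have hcsum : ∀ c, cappedSum bs c = cappedSum budgets c := fun c => cappedSum_perm hperm c
  have hsum_eq : bs.sum = budgets.sum := hperm.sum_eq
  -- cappedSum at the maximum is the plain sum
  have hcs_mx : cappedSum budgets mx = budgets.sum := by
    have := cappedSum_split budgets [] mx hmx_max (by simp)
    simpa using this
  -- A's result
  have hA := solutionLoop_post budgets M (mx + 1 - 0).toNat 0 mx 0 rfl
  -- B's result
  have hB := altLoop_post M bs hsort hbs_ne bs [] rfl (Or.inl rfl)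
  simp only [List.length_nil, Int.natCast_zero, List.sum_nil] at hB
  rw [solution, hmx, solution_alt, hmx]
  simp only [← hbsdef]
  rcases hB with ⟨hBnone, hBsum⟩ | ⟨cap, hBsome, hgood, hbad, q, hq, hcapq⟩
  · -- B took no early return: the full sum fits, B returns max(0, mx)
    simp only [hBnone]
    have hfits : cappedSum budgets mx ≤ M := by omega
    rcases hA with ⟨hA0, hAbad⟩ | ⟨hA1, hA2, hA3, hAbad⟩
    · -- A found nothing in [0, mx]: only possible when mx < 0
      have hmxneg : mx < 0 := by
        by_contra hge
        have := hAbad mx (by omega) (le_refl mx)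
        omega
      rw [hA0, if_neg (by omega)]
    · -- A found the greatest admissible cap in [0, mx]: it is mx itself
      have hAeq : solutionLoop budgets M 0 mx 0 = mx := by
        by_contra hne'
        have := hAbad mx (by omega) (le_refl mx)
        omega
      rw [hAeq]
      by_cases hmxpos : mx > 0
      · rw [if_pos hmxpos]
      · rw [if_neg hmxpos]
        omega
  · -- B returned max(0, cap) with cap the greatest admissible value overall
    simp only [hBsome]
    rw [hcsum] at hgood
    have hbad' : ∀ c, cap < c → cappedSum budgets c > M := by
      intro c hc
      rw [← hcsum]
      exact hbad c hc
    have hqmx : q ≤ mx := hmx_max q (hperm.mem_iff.mp hq)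
    have hcapmx : cap < mx := lt_of_lt_of_le hcapq hqmx
    rcases hA with ⟨hA0, hAbad⟩ | ⟨hA1, hA2, hA3, hAbad⟩
    · -- nothing admissible in [0, mx]: cap must be negative, both return 0
      have hcapneg : cap < 0 := by
        by_contra hge
        have := hAbad cap (by omega) (by omega)
        omega
      rw [hA0, if_neg (by omega)]
    · -- A's result is the greatest admissible cap in [0, mx]
      by_cases hcappos : cap > 0
      · rw [if_pos hcappos]
        by_contra hne'
        rcases lt_or_gt_of_ne (fun e => hne' e) with hlt | hgt
        · have := hAbad cap hlt (by omega)
          omega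
        · have := hbad' _ hgt
          omega
      · rw [if_neg hcappos]
        by_contra hne'
        have hApos : solutionLoop budgets M 0 mx 0 > 0 := by omega
        have := hbad' _ (by omega : cap < solutionLoop budgets M 0 mx 0)
        omega

-- ===== VERDICT (by name: the statement is the Claim_ definition above) =====
theorem solution_spec : Claim_equal_solution := by
  intro budgets M _ hpre
  exact solution_agrees budgets M hpre
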